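-- pv_equiv track=rewrite | github.com/SCollinA/ff-schedule-maker | FFScheduleMaker.py | playoff_rounds
-- ===== SOURCE A (Python) =====
-- def playoff_rounds(number_of_playoff_teams):
--     num_teams = number_of_playoff_teams
--     rounds_of_playoffs = 0
--     while num_teams > 1:
--         if num_teams % 2 == 0:
--             rounds_of_playoffs += 1
--         else:
--             rounds_of_playoffs += 1
--         num_teams /= 2
--     return rounds_of_playoffs
-- ===== SOURCE B (Python) =====
-- def playoff_rounds(number_of_playoff_teams):
--     if number_of_playoff_teams <= 1:
--         return 0
--     return (number_of_playoff_teams - 1).bit_length()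
-- ===== Notes on version B (the rewrite author's own statement) =====
-- stated objective: faster
-- what changed: Replaced the repeated-halving loop (counting float divisions by 2 until the value drops to 1) by the closed form ceil(log2 n) computed as (n-1).bit_length() for n >= 2, with 0 for n <= 1.
import Mathlib
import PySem

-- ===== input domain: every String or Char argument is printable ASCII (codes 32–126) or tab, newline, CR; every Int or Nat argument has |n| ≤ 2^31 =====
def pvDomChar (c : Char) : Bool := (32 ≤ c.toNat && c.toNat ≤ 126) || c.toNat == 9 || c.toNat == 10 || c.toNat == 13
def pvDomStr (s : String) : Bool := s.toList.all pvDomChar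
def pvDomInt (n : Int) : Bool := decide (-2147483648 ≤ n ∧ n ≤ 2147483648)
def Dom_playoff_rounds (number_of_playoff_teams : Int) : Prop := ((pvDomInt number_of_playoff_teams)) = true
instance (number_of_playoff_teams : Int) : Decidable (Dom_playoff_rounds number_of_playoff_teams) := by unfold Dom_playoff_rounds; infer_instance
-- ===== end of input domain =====

-- ===== PORT A =====
-- the while-loop of A: num_teams is a Python float after the first division; exact
-- halving of integers ≤ 2^31 is exact in binary floating point, modelled here by ℚ
def playoffLoop (num_teams : ℚ) (rounds_of_playoffs : Int) : Int :=
  if h : 1 < num_teams then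
    -- both branches of A's `if num_teams % 2 == 0` add 1
    playoffLoop (num_teams / 2)
      (if num_teams % 2 = 0 then rounds_of_playoffs + 1 else rounds_of_playoffs + 1)
  else rounds_of_playoffs
termination_by ⌈num_teams⌉.toNat
decreasing_by
  have h2 : (2 : ℤ) ≤ ⌈num_teams⌉ := by
    have := Int.lt_ceil.mpr (show ((1:ℤ):ℚ) < num_teams by exact_mod_cast h)
    omega
  have hle : ⌈num_teams / 2⌉ ≤ ⌈num_teams⌉ - 1 := by
    apply Int.ceil_le.mpr
    have hq : num_teams ≤ (⌈num_teams⌉ : ℚ) := Int.le_ceil _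
    have : (2 : ℚ) ≤ (⌈num_teams⌉ : ℚ) := by exact_mod_cast h2
    push_cast
    linarith
  omega

def playoff_rounds (number_of_playoff_teams : Int) : Int :=
  playoffLoop (number_of_playoff_teams : ℚ) 0

-- ===== PORT B =====
-- B: 0 for n ≤ 1, else (n-1).bit_length(); Nat.size is Python's int.bit_length on ℕ
def playoff_rounds_alt (number_of_playoff_teams : Int) : Int :=
  if number_of_playoff_teams ≤ 1 then 0
  else ((number_of_playoff_teams - 1).toNat.size : Int)

-- ===== PRECONDITION & SPEC =====
def Spec_playoff_rounds (number_of_playoff_teams : Int) (out : Int) : Prop := out = playoff_rounds_alt number_of_playoff_teams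
instance (number_of_playoff_teams : Int) (out : Int) : Decidable (Spec_playoff_rounds number_of_playoff_teams out) := by unfold Spec_playoff_rounds; infer_instance

-- ===== CLAIM (what is proved, stated in full; the proofs are below) =====
def Claim_equal_playoff_rounds : Prop := ∀ (number_of_playoff_teams : Int), Dom_playoff_rounds number_of_playoff_teams → Spec_playoff_rounds number_of_playoff_teams (playoff_rounds number_of_playoff_teams)

-- ===== LEMMAS AND PROOFS =====

-- the loop adds k+1 when 2^k < q ≤ 2^(k+1)
theorem playoffLoop_pow (k : Nat) : ∀ (q : ℚ) (acc : Int),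
    2 ^ k < q → q ≤ 2 ^ (k + 1) → playoffLoop q acc = acc + (k + 1) := by
  induction k with
  | zero =>
    intro q acc h1 h2
    rw [playoffLoop.eq_def]
    have hgt : 1 < q := by simpa using h1
    rw [dif_pos hgt, playoffLoop.eq_def]
    have : ¬ (1 : ℚ) < q / 2 := by
      have h2' : q ≤ 2 := by simpa using h2
      intro hc; linarith
    rw [dif_neg this]
    split <;> push_cast <;> ring
  | succ k ih =>
    intro q acc h1 h2
    rw [playoffLoop.eq_def]
    have hgt : 1 < q := by
      have : (1 : ℚ) ≤ 2 ^ (k + 1) := one_le_pow₀ (by norm_num)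
      linarith
    rw [dif_pos hgt]
    have e1 : (2 : ℚ) ^ k < q / 2 := by
      rw [lt_div_iff₀ (by norm_num : (0:ℚ) < 2)]
      calc (2:ℚ) ^ k * 2 = 2 ^ (k + 1) := by ring
        _ < q := h1
    have e2 : q / 2 ≤ 2 ^ (k + 1) := by
      rw [div_le_iff₀ (by norm_num : (0:ℚ) < 2)]
      calc q ≤ 2 ^ (k + 1 + 1) := h2
        _ = 2 ^ (k + 1) * 2 := by ring
    rw [ih (q / 2) _ e1 e2]
    split <;> push_cast <;> ring

theorem playoff_rounds_eq (n : Int) : playoff_rounds n = playoff_rounds_alt n := by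
  by_cases hn : n ≤ 1
  · unfold playoff_rounds playoff_rounds_alt
    rw [if_pos hn, playoffLoop, dif_neg (by exact_mod_cast not_lt.mpr hn)]
  · rw [not_le] at hn
    have h2 : 2 ≤ n := hn
    set m : Nat := (n - 1).toNat with hm
    have hm1 : 1 ≤ m := by omega
    have hs : 1 ≤ m.size := Nat.size_pos.mpr hm1
    set s : Nat := m.size with hsdef
    have hlow : (2 : ℤ) ^ (s - 1) ≤ n - 1 := by
      have := Nat.lt_size.mp (show s - 1 < m.size by omega)
      have : ((2 ^ (s - 1) : Nat) : ℤ) ≤ (m : ℤ) := by exact_mod_cast this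
      push_cast at this
      omega
    have hhigh : n - 1 < (2 : ℤ) ^ s := by
      have := Nat.lt_size_self m
      have : ((m : ℤ)) < ((2 ^ s : Nat) : ℤ) := by exact_mod_cast this
      push_cast at this
      omega
    have e1 : (2 : ℚ) ^ (s - 1) < (n : ℚ) := by
      have : (2 : ℤ) ^ (s - 1) < n := by omega
      exact_mod_cast this
    have e2 : (n : ℚ) ≤ 2 ^ (s - 1 + 1) := by
      have hs1 : s - 1 + 1 = s := by omega
      rw [hs1]
      have : n ≤ (2 : ℤ) ^ s := by omega
      exact_mod_cast this
    unfold playoff_rounds playoff_rounds_alt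
    rw [if_neg (by omega)]
    rw [playoffLoop_pow (s - 1) (n : ℚ) 0 e1 e2]
    have hss : (n - 1).toNat.size = s := by rw [hsdef, hm]
    omega

-- ===== VERDICT (by name: the statement is the Claim_ definition above) =====
theorem playoff_rounds_spec : Claim_equal_playoff_rounds := by
  intro n _
  exact playoff_rounds_eq n
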